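-- pv_equiv track=rewrite | github.com/mcknuggie/transformer_melody_generator | midiPreprocessor.py | _separate_midi_notes
-- ===== SOURCE A (Python) =====
-- def _separate_midi_notes(songs):
--     separated_songs = [] # a list of songs where each song is a list of notes but the inidividual note features are separated
--     for song in songs:
--         separated_song = [] # a single song represented by a bunch of individual note features
--         for note in song:
--             note_components = note.split()
--             separated_song.extend(note_components)
--
--         separated_songs.append(separated_song)
--
--     return separated_songs
-- ===== SOURCE B (Python) =====
-- def _separate_midi_notes(songs):
--     # Character-level tokenizer: no str.split at all. Scan every character of
--     # every note, accumulating the current word in a buffer; flush the buffer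
--     # on whitespace and at the end of each note (a note boundary ends a word).
--     out = []
--     for song in songs:
--         tokens = []
--         cur = []
--         for note in song:
--             for ch in note:
--                 if ch.isspace():
--                     if cur:
--                         tokens.append(''.join(cur))
--                         cur = []
--                 else:
--                     cur.append(ch)
--             if cur:
--                 tokens.append(''.join(cur))
--                 cur = []
--         out.append(tokens)
--     return out
-- ===== Notes on version B (the rewrite author's own statement) =====
-- stated objective: alternative
-- what changed: Instead of calling str.split on each note and extending a list, B tokenizes by hand: a single character-level scan per song with an explicit current-word buffer that is flushed on whitespace and at each note boundary.
import Mathlib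
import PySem

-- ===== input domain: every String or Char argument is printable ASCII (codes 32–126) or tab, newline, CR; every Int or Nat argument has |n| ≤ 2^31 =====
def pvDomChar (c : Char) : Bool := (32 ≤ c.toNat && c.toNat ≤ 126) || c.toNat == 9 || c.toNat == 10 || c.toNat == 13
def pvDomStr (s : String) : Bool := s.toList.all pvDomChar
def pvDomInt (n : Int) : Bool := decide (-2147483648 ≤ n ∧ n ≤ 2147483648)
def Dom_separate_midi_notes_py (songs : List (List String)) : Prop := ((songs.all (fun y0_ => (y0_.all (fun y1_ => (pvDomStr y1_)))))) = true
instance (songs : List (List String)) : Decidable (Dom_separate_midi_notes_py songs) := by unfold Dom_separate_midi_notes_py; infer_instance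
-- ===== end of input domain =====

-- B replaces per-note str.split + extend by a hand-written character-level tokenizer
-- with an explicit current-word buffer (objective: alternative).

-- ===== PORT A =====
-- A: for each song, an inner loop splits each note (str.split) and extends an accumulator.
def separate_midi_notes_py (songs : List (List String)) : List (List String) :=
  songs.foldl (fun separated_songs song =>
    separated_songs ++
      [song.foldl (fun separated_song note => separated_song ++ PySem.Str.split₀ note) []]) []

-- ===== PORT B =====
-- B: scan one note's characters; 'cur' is the current word buffer, flushed on
-- whitespace; the trailing flush at note end is the [] case.
def pvScanNote : List Char → List Char → List String
  | [], cur => if cur = [] then [] else [String.ofList cur]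
  | ch :: rest, cur =>
    if PySem.Chars.isspace ch then
      (if cur = [] then pvScanNote rest [] else String.ofList cur :: pvScanNote rest [])
    else pvScanNote rest (cur ++ [ch])

-- outer loops of Source B: per song, fold the notes, appending each note's tokens
def separate_midi_notes_py_alt (songs : List (List String)) : List (List String) :=
  songs.map (fun song =>
    song.foldl (fun tokens note => tokens ++ pvScanNote note.toList []) [])

-- ===== PRECONDITION & SPEC =====
def Spec_separate_midi_notes_py (songs : List (List String)) (out : List (List String)) : Prop := out = separate_midi_notes_py_alt songs
instance (songs : List (List String)) (out : List (List String)) : Decidable (Spec_separate_midi_notes_py songs out) := by unfold Spec_separate_midi_notes_py; infer_instance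

-- ===== CLAIM =====
def Claim_equal_separate_midi_notes_py : Prop := ∀ (songs : List (List String)), Dom_separate_midi_notes_py songs → Spec_separate_midi_notes_py songs (separate_midi_notes_py songs)

-- ===== LEMMAS AND PROOFS =====

-- The split₀ worker only ever appends to the accumulator's reverse.
theorem split0_go_shift (s : List Char) : ∀ (cur : List Char) (acc : List (List Char)),
    PySem.Chars.split₀.go s cur acc = acc.reverse ++ PySem.Chars.split₀.go s cur [] := by
  induction s with
  | nil =>
    intro cur acc
    simp only [PySem.Chars.split₀.go]
    by_cases h : cur.isEmpty = true
    · rw [if_pos h, if_pos h]; simp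
    · rw [if_neg h, if_neg h]; simp
  | cons c rest ih =>
    intro cur acc
    simp only [PySem.Chars.split₀.go]
    by_cases hs : PySem.Chars.isspace c = true
    · rw [if_pos hs, if_pos hs]
      by_cases h : cur.isEmpty = true
      · rw [if_pos h, if_pos h]; exact ih [] acc
      · rw [if_neg h, if_neg h, ih [] (cur.reverse :: acc), ih [] [cur.reverse]]
        simp
    · rw [if_neg hs, if_neg hs]; exact ih (c :: cur) acc

-- B's hand tokenizer (buffer kept in order) equals split₀'s worker (buffer reversed).
theorem scanNote_eq_go (s : List Char) : ∀ (cur : List Char),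
    pvScanNote s cur = (PySem.Chars.split₀.go s cur.reverse []).map String.ofList := by
  induction s with
  | nil =>
    intro cur
    simp only [pvScanNote, PySem.Chars.split₀.go]
    by_cases h : cur = []
    · subst h; simp
    · rw [if_neg h, if_neg (by simpa [List.isEmpty_iff] using h)]
      simp
  | cons c rest ih =>
    intro cur
    simp only [pvScanNote, PySem.Chars.split₀.go]
    by_cases hs : PySem.Chars.isspace c = true
    · rw [if_pos hs, if_pos hs]
      by_cases h : cur = []
      · subst h
        rw [if_pos rfl, if_pos (by simp)]
        simpa using ih []
      · rw [if_neg h, if_neg (by simpa [List.isEmpty_iff] using h)]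
        rw [split0_go_shift rest [] [cur.reverse.reverse]]
        simp [ih []]
    · rw [if_neg hs, if_neg hs]
      simpa using ih (cur ++ [c])

theorem scanNote_eq_split₀ (note : String) :
    pvScanNote note.toList [] = PySem.Str.split₀ note := by
  rw [scanNote_eq_go]
  simp [PySem.Str.split₀, PySem.Chars.split₀]

-- ===== VERDICT =====
theorem separate_midi_notes_py_spec : Claim_equal_separate_midi_notes_py := by
  intro songs _
  unfold Spec_separate_midi_notes_py separate_midi_notes_py separate_midi_notes_py_alt
  rw [PySem.List.foldl_append_singleton_eq_map, List.nil_append]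
  refine List.map_congr_left (fun song _ => ?_)
  apply PySem.List.foldl_congr_mem
  intro acc x _
  rw [scanNote_eq_split₀]
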